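-- pv_equiv track=rewrite | github.com/DeliangZhong/MasterField | cuntz_bootstrap/reflection_positivity.py | positive_half_open_paths
-- ===== SOURCE A (Python) =====
-- from itertools import product
-- from typing import Optional
--
-- def positive_half_open_paths(
--     D: int, length_cutoff: int, time_axis: Optional[int] = None
-- ) -> list[tuple[int, ...]]:
--     """Enumerate open paths with no step in the -time_axis direction.
--
--     Includes the empty path. Allows all signed non-time-axis steps and only
--     the +time_axis step.
--     """
--     if time_axis is None:
--         time_axis = D
--     allowed: list[int] = []
--     for axis in range(1, D + 1):
--         if axis == time_axis:
--             allowed.append(+axis)  # forward time only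
--         else:
--             allowed.extend([+axis, -axis])
--
--     paths: list[tuple[int, ...]] = [()]
--     for k in range(1, length_cutoff + 1):
--         for steps in product(allowed, repeat=k):
--             paths.append(tuple(steps))
--     return paths
-- ===== SOURCE B (Python) =====
-- from typing import Optional
--
--
-- def positive_half_open_paths(
--     D: int, length_cutoff: int, time_axis: Optional[int] = None
-- ) -> list[tuple[int, ...]]:
--     """Base-m decoding version: the i-th path of length k is the k-digit
--     base-m representation of i (most significant first), each digit mapped
--     through the allowed-step table."""
--     if time_axis is None:
--         time_axis = D
--     allowed = [
--         s
--         for axis in range(1, D + 1)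
--         for s in ((axis,) if axis == time_axis else (axis, -axis))
--     ]
--     m = len(allowed)
--
--     def decode(k: int, i: int) -> tuple[int, ...]:
--         digits = []
--         for _ in range(k):
--             digits.append(allowed[i % m])
--             i //= m
--         digits.reverse()
--         return tuple(digits)
--
--     return [()] + [
--         decode(k, i) for k in range(1, length_cutoff + 1) for i in range(m**k)
--     ]
-- ===== Notes on version B (the rewrite author's own statement) =====
-- stated objective: alternative
-- what changed: Replaces the itertools.product enumeration by base-m arithmetic decoding: with m allowed steps, the i-th length-k path is computed as the k-digit base-m representation of i (most significant digit first) mapped through the allowed-step table, so no cartesian-product machinery or tuple concatenation tree is needed.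
import Mathlib
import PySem

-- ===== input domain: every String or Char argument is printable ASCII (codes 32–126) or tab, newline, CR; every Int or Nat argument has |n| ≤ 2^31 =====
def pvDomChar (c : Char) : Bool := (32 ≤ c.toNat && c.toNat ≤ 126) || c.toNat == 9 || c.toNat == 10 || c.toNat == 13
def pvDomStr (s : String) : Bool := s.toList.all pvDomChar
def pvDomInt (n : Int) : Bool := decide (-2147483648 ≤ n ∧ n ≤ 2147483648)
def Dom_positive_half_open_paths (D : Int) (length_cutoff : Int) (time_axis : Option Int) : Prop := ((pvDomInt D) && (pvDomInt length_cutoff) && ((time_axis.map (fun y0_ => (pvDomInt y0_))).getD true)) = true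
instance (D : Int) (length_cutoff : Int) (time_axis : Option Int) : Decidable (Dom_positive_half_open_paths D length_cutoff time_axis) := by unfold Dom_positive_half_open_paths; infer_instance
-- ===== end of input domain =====

-- B replaces the per-length cartesian `product` by base-m arithmetic decoding:
-- the i-th length-k path is the k-digit base-m representation of i mapped
-- through the allowed-step table; objective: alternative algorithm, same output.

-- ===== PORT A =====
-- allowed-building loop of A (append/extend accumulator)
def pvAllowedA (D : Int) (time_axis : Option Int) : List Int :=
  let ta := time_axis.getD D
  (PySem.List.pyRange 1 (D + 1) 1).foldl
    (fun acc axis => if axis == ta then acc ++ [axis] else acc ++ [axis, -axis]) []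

-- itertools.product(allowed, repeat=k): first coordinate outermost, last fastest
def pvProdA (allowed : List Int) : Nat → List (List Int)
  | 0 => [[]]
  | k+1 => allowed.flatMap (fun s => (pvProdA allowed k).map (fun t => s :: t))

def positive_half_open_paths (D : Int) (length_cutoff : Int) (time_axis : Option Int) : List (List Int) :=
  let allowed := pvAllowedA D time_axis
  (PySem.List.pyRange 1 (length_cutoff + 1) 1).foldl
    (fun paths k => paths ++ pvProdA allowed k.toNat) [[]]

-- ===== PORT B =====
-- the digits loop of decode: k iterations, state (digits, i); allowed[i % m] is
-- always in range when this loop is reached (0 ≤ i % m < m = len allowed), so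
-- pyGetD is exact there
def pvDigitsLoop (allowed : List Int) (m : Int) : Nat → List Int → Int → List Int
  | 0, digits, _ => digits
  | k+1, digits, i =>
      pvDigitsLoop allowed m k
        (digits ++ [PySem.List.pyGetD allowed (PySem.Int.mod i m) 0])
        (PySem.Int.floordiv i m)

-- decode(k, i): base-m digits of i, LSB collected first, then reversed
def pvDecode (allowed : List Int) (m : Int) (k : Nat) (i : Int) : List Int :=
  (pvDigitsLoop allowed m k [] i).reverse

def positive_half_open_paths_alt (D : Int) (length_cutoff : Int) (time_axis : Option Int) : List (List Int) :=
  let ta := time_axis.getD D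
  -- comprehension form of the allowed-step table
  let allowed := (PySem.List.pyRange 1 (D + 1) 1).flatMap
    (fun axis => if axis == ta then [axis] else [axis, -axis])
  let m : Int := allowed.length
  [[]] ++ (PySem.List.pyRange 1 (length_cutoff + 1) 1).flatMap
    (fun k => (PySem.List.pyRange 0 (m ^ k.toNat) 1).map (fun i => pvDecode allowed m k.toNat i))

-- ===== PRECONDITION & SPEC =====
def Spec_positive_half_open_paths (D : Int) (length_cutoff : Int) (time_axis : Option Int) (out : List (List Int)) : Prop := out = positive_half_open_paths_alt D length_cutoff time_axis
instance (D : Int) (length_cutoff : Int) (time_axis : Option Int) (out : List (List Int)) : Decidable (Spec_positive_half_open_paths D length_cutoff time_axis out) := by unfold Spec_positive_half_open_paths; infer_instance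

-- ===== CLAIM (what is proved, stated in full; the proofs are below) =====
def Claim_equal_positive_half_open_paths : Prop := ∀ (D : Int) (length_cutoff : Int) (time_axis : Option Int), Dom_positive_half_open_paths D length_cutoff time_axis → Spec_positive_half_open_paths D length_cutoff time_axis (positive_half_open_paths D length_cutoff time_axis)

-- ===== LEMMAS AND PROOFS =====

-- the two allowed tables coincide
theorem pvAllowed_eq (D : Int) (ta : Option Int) :
    pvAllowedA D ta =
      (PySem.List.pyRange 1 (D + 1) 1).flatMap
        (fun axis => if axis == ta.getD D then [axis] else [axis, -axis]) := by
  show (PySem.List.pyRange 1 (D + 1) 1).foldl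
      (fun acc axis => if axis == ta.getD D then acc ++ [axis] else acc ++ [axis, -axis]) [] = _
  have hf : (fun (acc : List Int) (axis : Int) =>
        if axis == ta.getD D then acc ++ [axis] else acc ++ [axis, -axis])
      = fun acc axis => acc ++ (if axis == ta.getD D then [axis] else [axis, -axis]) := by
    funext acc axis; split <;> rfl
  rw [hf, PySem.List.foldl_append_eq_flatMap]
  rfl

-- extending every path of a level by one trailing step
def pvExtend (allowed : List Int) (lvl : List (List Int)) : List (List Int) :=
  lvl.flatMap (fun p => allowed.map (fun s => p ++ [s]))

theorem pvFlatMap_singleton {α β : Type} (l : List α) (f : α → β) :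
    l.flatMap (fun s => [f s]) = l.map f := by
  induction l with
  | nil => rfl
  | cons a l ih => simp [List.flatMap_cons, ih]

theorem pvExtend_prod (allowed : List Int) (k : Nat) :
    pvExtend allowed (pvProdA allowed k) = pvProdA allowed (k+1) := by
  induction k with
  | zero => simp [pvExtend, pvProdA, pvFlatMap_singleton]
  | succ k ih =>
    calc pvExtend allowed (pvProdA allowed (k+1))
        = allowed.flatMap (fun s => pvExtend allowed ((pvProdA allowed k).map (fun t => s :: t))) := by
          simp [pvProdA, pvExtend, List.flatMap_assoc]
      _ = allowed.flatMap (fun s => (pvExtend allowed (pvProdA allowed k)).map (fun t => s :: t)) := by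
          simp [pvExtend, List.flatMap_map, List.map_flatMap, List.map_map, Function.comp_def]
      _ = pvProdA allowed (k+2) := by rw [ih]; simp [pvProdA]

theorem pvDigitsLoop_acc (allowed : List Int) (m : Int) (k : Nat) (ds : List Int) (i : Int) :
    pvDigitsLoop allowed m k ds i = ds ++ pvDigitsLoop allowed m k [] i := by
  induction k generalizing ds i with
  | zero => simp [pvDigitsLoop]
  | succ k ih =>
    simp only [pvDigitsLoop]
    rw [ih, ih ([] ++ [PySem.List.pyGetD allowed (PySem.Int.mod i m) 0])]
    simp

theorem pvDecode_succ (allowed : List Int) (m : Int) (k : Nat) (i : Int) :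
    pvDecode allowed m (k+1) i =
      pvDecode allowed m k (PySem.Int.floordiv i m) ++
        [PySem.List.pyGetD allowed (PySem.Int.mod i m) 0] := by
  unfold pvDecode
  rw [pvDigitsLoop, pvDigitsLoop_acc]
  simp

-- counting in base m: List.range (M*m) splits into blocks q*m + s
theorem pvRange_mul (M m : Nat) :
    List.range (M * m) =
      (List.range M).flatMap (fun q => (List.range m).map (fun s => q * m + s)) := by
  induction M with
  | zero => simp
  | succ M ih =>
    have h : (M + 1) * m = M * m + m := by ring
    rw [h, List.range_add, ih, List.range_succ]
    simp

-- reading the digit table back gives allowed itself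
theorem pvGetD_range (allowed : List Int) :
    (List.range allowed.length).map (fun s => allowed.getD s 0) = allowed := by
  induction allowed with
  | nil => rfl
  | cons a l ih =>
    rw [List.length_cons, List.range_succ_eq_map]
    simp only [List.map_cons, List.map_map, Function.comp_def, List.getD_cons_zero,
      List.getD_cons_succ]
    rw [ih]

-- the key lemma: decoding 0..m^k-1 enumerates exactly product(allowed, repeat=k)
theorem pvDecode_enum (allowed : List Int) (k : Nat) :
    (List.range (allowed.length ^ k)).map
        (fun i : Nat => pvDecode allowed (allowed.length : Int) k (i : Int)) =
      pvProdA allowed k := by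
  set m := allowed.length with hm
  induction k with
  | zero => simp [pvProdA, pvDecode, pvDigitsLoop]
  | succ k ih =>
    by_cases hm0 : m = 0
    · -- empty step table: both sides are empty
      have ha : allowed = [] := List.length_eq_zero_iff.mp (hm ▸ hm0)
      subst ha
      simp [pvProdA, hm0]
    · have hmpos : 0 < m := Nat.pos_of_ne_zero hm0
      have hpow : m ^ (k+1) = m ^ k * m := by ring
      rw [hpow, pvRange_mul, List.map_flatMap]
      have hdec : ∀ q s : Nat, s < m →
          pvDecode allowed (m : Int) (k+1) ((q * m + s : Nat) : Int) =
            pvDecode allowed (m : Int) k (q : Int) ++ [allowed.getD s 0] := by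
        intro q s hs
        rw [pvDecode_succ]
        have h1 : PySem.Int.floordiv ((q * m + s : Nat) : Int) (m : Int) = (q : Int) := by
          rw [show ((q * m + s : Nat) : Int) = (((q * m + s : Nat) : Nat) : Int) from rfl,
            PySem.Int.floordiv_natCast]
          congr 1
          rw [Nat.mul_comm q m, Nat.mul_add_div hmpos, Nat.div_eq_of_lt hs]
          omega
        have h2 : PySem.Int.mod ((q * m + s : Nat) : Int) (m : Int) = (s : Int) := by
          rw [show ((q * m + s : Nat) : Int) = (((q * m + s : Nat) : Nat) : Int) from rfl,
            PySem.Int.mod_natCast]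
          congr 1
          rw [Nat.mul_comm q m, Nat.mul_add_mod, Nat.mod_eq_of_lt hs]
        rw [h1, h2, PySem.List.pyGetD_natCast]
      calc (List.range (m ^ k)).flatMap
              (fun q => ((List.range m).map (fun s => q * m + s)).map
                (fun i : Nat => pvDecode allowed (m : Int) (k+1) (i : Int)))
          = (List.range (m ^ k)).flatMap
              (fun (q : Nat) => allowed.map
                (fun a => pvDecode allowed (m : Int) k (q : Int) ++ [a])) := by
            refine List.flatMap_congr ?_
            intro q _
            rw [List.map_map]
            have h1 : (List.range m).map
                ((fun i : Nat => pvDecode allowed (m : Int) (k+1) (i : Int)) ∘ fun s => q * m + s)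
                = (List.range m).map
                  (fun s => pvDecode allowed (m : Int) k (q : Int) ++ [allowed.getD s 0]) := by
              refine List.map_congr_left ?_
              intro s hs
              exact hdec q s (List.mem_range.mp hs)
            rw [h1, show (fun s => pvDecode allowed (m : Int) k (q : Int) ++ [allowed.getD s 0])
                = (fun a => pvDecode allowed (m : Int) k (q : Int) ++ [a]) ∘ (fun s => allowed.getD s 0) from rfl,
              ← List.map_map, hm, pvGetD_range]
        _ = pvExtend allowed
              ((List.range (m ^ k)).map (fun i : Nat => pvDecode allowed (m : Int) k (i : Int))) := by
            rw [pvExtend, List.flatMap_map]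
        _ = pvProdA allowed (k+1) := by rw [ih, pvExtend_prod]

theorem positive_half_open_paths_eq (D length_cutoff : Int) (ta : Option Int) :
    positive_half_open_paths D length_cutoff ta = positive_half_open_paths_alt D length_cutoff ta := by
  have hA : positive_half_open_paths D length_cutoff ta
      = (PySem.List.pyRange 1 (length_cutoff + 1) 1).foldl
          (fun paths k => paths ++ pvProdA (pvAllowedA D ta) k.toNat) [[]] := rfl
  have hB : positive_half_open_paths_alt D length_cutoff ta
      = [[]] ++ (PySem.List.pyRange 1 (length_cutoff + 1) 1).flatMap
          (fun k => (PySem.List.pyRange 0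
              ((((PySem.List.pyRange 1 (D + 1) 1).flatMap
                  (fun axis => if axis == ta.getD D then [axis] else [axis, -axis])).length : Int) ^ k.toNat) 1).map
            (fun i => pvDecode
              ((PySem.List.pyRange 1 (D + 1) 1).flatMap
                (fun axis => if axis == ta.getD D then [axis] else [axis, -axis]))
              (((PySem.List.pyRange 1 (D + 1) 1).flatMap
                  (fun axis => if axis == ta.getD D then [axis] else [axis, -axis])).length : Int)
              k.toNat i)) := rfl
  rw [hA, hB, pvAllowed_eq]
  set al := (PySem.List.pyRange 1 (D + 1) 1).flatMap
      (fun axis => if axis == ta.getD D then [axis] else [axis, -axis]) with hal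
  rw [PySem.List.foldl_append_eq_flatMap (g := fun k : Int => pvProdA al k.toNat)]
  congr 1
  refine List.flatMap_congr ?_
  intro k _
  have hcast : ((al.length : Int) ^ k.toNat) = ((al.length ^ k.toNat : Nat) : Int) := by
    push_cast; ring
  rw [hcast, PySem.List.pyRange_one]
  have ht : (((al.length ^ k.toNat : Nat) : Int) - 0).toNat = al.length ^ k.toNat := by omega
  rw [ht, ← pvDecode_enum al k.toNat, List.map_map]
  refine List.map_congr_left ?_
  intro j _
  simp

-- ===== VERDICT (by name: the statement is the Claim_ definition above) =====
theorem positive_half_open_paths_spec : Claim_equal_positive_half_open_paths := by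
  intro D lc ta _
  unfold Spec_positive_half_open_paths
  exact positive_half_open_paths_eq D lc ta
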